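-- pv_equiv track=rewrite | github.com/selotape/katas | katas/eight_queens.py | legal_next_placements
-- ===== SOURCE A (Python) =====
-- def legal_next_placements(prev, n):
--     possible_placements = set(range(1, n + 1))
--     possible_placements -= set(prev)
--     next_pos = len(prev) + 1
--     for col, row in enumerate(prev, start=1):
--         dist = next_pos - col
--         illegal_rows = {row + dist, row - dist}
--         possible_placements -= illegal_rows
--     return possible_placements
-- ===== SOURCE B (Python) =====
-- def legal_next_placements(prev, n):
--     k = len(prev)
--     return {r for r in range(1, n + 1)
--             if all(r != q and abs(r - q) != k + 1 - col
--                    for col, q in enumerate(prev, start=1))}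
-- ===== Notes on version B (the rewrite author's own statement) =====
-- stated objective: simpler
-- what changed: Replaces A's build-a-set-then-subtract-per-queen loop (range set minus occupied rows minus two diagonal rows per previous column) by a single set comprehension that keeps a candidate row iff it conflicts with no previous queen (per-candidate scan over enumerate(prev)).
import Mathlib
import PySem

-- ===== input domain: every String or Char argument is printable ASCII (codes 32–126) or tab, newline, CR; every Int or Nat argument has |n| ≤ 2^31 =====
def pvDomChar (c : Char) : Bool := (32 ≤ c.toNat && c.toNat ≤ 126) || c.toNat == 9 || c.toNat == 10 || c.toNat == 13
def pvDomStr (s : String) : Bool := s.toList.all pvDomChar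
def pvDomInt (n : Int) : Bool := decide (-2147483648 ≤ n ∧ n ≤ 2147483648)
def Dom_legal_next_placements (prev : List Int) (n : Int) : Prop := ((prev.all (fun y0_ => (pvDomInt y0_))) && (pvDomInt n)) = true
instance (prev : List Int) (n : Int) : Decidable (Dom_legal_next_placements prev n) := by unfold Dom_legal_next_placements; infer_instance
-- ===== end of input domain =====

-- B replaces A's set-subtraction loop by a per-candidate all-queens conflict scan (objective: simpler).

-- ===== PORT A =====
def legal_next_placements (prev : List Int) (n : Int) : List Int :=
  let possible0 : PySem.Set Int := PySem.Set.ofList (PySem.List.pyRange 1 (n + 1))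
  let possible1 : PySem.Set Int := PySem.Set.diff possible0 (PySem.Set.ofList prev)
  let next_pos : Int := (prev.length : Int) + 1
  (PySem.List.enumerate prev 1).foldl
    (fun pp cr =>
      let dist := next_pos - cr.1
      PySem.Set.diff pp (PySem.Set.ofList [cr.2 + dist, cr.2 - dist]))
    possible1

-- ===== PORT B =====
def legal_next_placements_alt (prev : List Int) (n : Int) : List Int :=
  let k : Int := (prev.length : Int)
  PySem.Set.ofList ((PySem.List.pyRange 1 (n + 1)).filter (fun r =>
    (PySem.List.enumerate prev 1).all (fun cq =>
      decide (r ≠ cq.2) && decide (|r - cq.2| ≠ k + 1 - cq.1))))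

-- ===== PRECONDITION & SPEC =====
def Spec_legal_next_placements (prev : List Int) (n : Int) (out : List Int) : Prop := out = legal_next_placements_alt prev n
instance (prev : List Int) (n : Int) (out : List Int) : Decidable (Spec_legal_next_placements prev n out) := by unfold Spec_legal_next_placements; infer_instance

-- ===== CLAIM (what is proved, stated in full; the proofs are below) =====
def Claim_equal_legal_next_placements : Prop := ∀ (prev : List Int) (n : Int), Dom_legal_next_placements prev n → Spec_legal_next_placements prev n (legal_next_placements prev n)

-- ===== LEMMAS AND PROOFS =====

-- repeated set-difference = one filter by "in none of the removed sets"
theorem foldl_diff_eq_filter {β : Type} (l : List β) (f : β → PySem.Set Int) (s : List Int) :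
    l.foldl (fun pp b => PySem.Set.diff pp (f b)) s
      = s.filter (fun x => l.all (fun b => !(f b).contains x)) := by
  induction l generalizing s with
  | nil => simp
  | cons b rest ih =>
      simp only [List.foldl_cons]
      rw [ih]
      show (PySem.Set.diff s (f b)).filter _ = _
      simp only [PySem.Set.diff, List.filter_filter]
      exact List.filter_congr (fun x _ => by simp [Bool.and_comm])

theorem abs_eq_iff_of_pos (x d : Int) (hd : 0 < d) : |x| = d ↔ x = d ∨ x = -d := by
  rcases abs_cases x with ⟨h1, h2⟩ | ⟨h1, h2⟩ <;> omega

-- the per-row predicates of A and B coincide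
theorem pred_eq (prev : List Int) (r : Int) :
    ((!(PySem.Set.ofList prev).contains r) &&
      (PySem.List.enumerate prev 1).all (fun cq =>
        !(PySem.Set.ofList [cq.2 + (((prev.length : Int) + 1) - cq.1),
                            cq.2 - (((prev.length : Int) + 1) - cq.1)]).contains r))
    = (PySem.List.enumerate prev 1).all (fun cq =>
        decide (r ≠ cq.2) && decide (|r - cq.2| ≠ (prev.length : Int) + 1 - cq.1)) := by
  rw [Bool.eq_iff_iff]
  simp only [Bool.and_eq_true, Bool.not_eq_true', List.all_eq_true,
    PySem.Set.contains_eq_listContains, List.contains_eq_mem, decide_eq_false_iff_not,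
    PySem.Set.mem_ofList, Bool.and_eq_true, decide_eq_true_eq, List.mem_cons,
    List.not_mem_nil, or_false, PySem.List.mem_enumerate_iff]
  constructor
  · rintro ⟨hnot, hall⟩ cq ⟨k, hk, rfl⟩
    have h2 := hall _ ⟨k, hk, rfl⟩
    have hq : prev[k] ∈ prev := List.getElem_mem hk
    have hd : (0:Int) < (prev.length : Int) + 1 - (1 + (k : Int)) := by
      have : (k : Int) < (prev.length : Int) := by exact_mod_cast hk
      omega
    refine ⟨fun h => hnot (h ▸ hq), fun habs => h2 ?_⟩
    rcases (abs_eq_iff_of_pos _ _ hd).mp habs with h | h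
    · left; omega
    · right; omega
  · intro hall
    constructor
    · intro hmem
      rcases List.mem_iff_getElem.mp hmem with ⟨k, hk, rfl⟩
      exact (hall _ ⟨k, hk, rfl⟩).1 rfl
    · rintro cq ⟨k, hk, rfl⟩ h
      have h2 := hall _ ⟨k, hk, rfl⟩
      have hd : (0:Int) < (prev.length : Int) + 1 - (1 + (k : Int)) := by
        have : (k : Int) < (prev.length : Int) := by exact_mod_cast hk
        omega
      exact h2.2 ((abs_eq_iff_of_pos _ _ hd).mpr (by rcases h with h | h <;> [left; right] <;> omega))

-- ===== VERDICT (by name: the statement is the Claim_ definition above) =====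
theorem legal_next_placements_spec : Claim_equal_legal_next_placements := by
  intro prev n _
  unfold Spec_legal_next_placements legal_next_placements legal_next_placements_alt
  simp only
  rw [foldl_diff_eq_filter]
  rw [PySem.Set.ofList_eq_self_of_nodup _ (PySem.List.nodup_pyRange_one 1 (n + 1))]
  rw [PySem.Set.ofList_eq_self_of_nodup _
    (List.Nodup.filter _ (PySem.List.nodup_pyRange_one 1 (n + 1)))]
  show (List.filter _ (List.filter _ _)) = _
  rw [List.filter_filter]
  exact List.filter_congr (fun r _ => by rw [Bool.and_comm]; exact pred_eq prev r)
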